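-- pv_equiv track=rewrite | github.com/pypi-data/pypi-mirror-401 | packages/aade-publicity-search/aade_publicity_search-1.0.2-py3-none-any.whl/aade_publicity_search/utils.py | validate_afm
-- ===== SOURCE A (Python) =====
-- def validate_afm(afm: str) -> bool:
--     if not afm.isdigit() or len(afm) != 9 or afm == "000000000":
--         return False
--     m = 1
--     s = 0
--     for i in range(7, -1, -1):
--         m *= 2
--         s += int(afm[i]) * m
--     return (s % 11) % 10 == int(afm[8])
-- ===== SOURCE B (Python) =====
-- def validate_afm(afm: str) -> bool:
--     if not afm.isdigit() or len(afm) != 9 or afm == "000000000":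
--         return False
--     acc = 0
--     for ch in afm[:8]:
--         acc = acc * 2 + int(ch)
--     return (acc * 2 % 11) % 10 == int(afm[8])
-- ===== Notes on version B (the rewrite author's own statement) =====
-- stated objective: simpler
-- what changed: Replaces A's backward indexed loop that maintains an explicit doubling weight m alongside the sum by a single forward Horner pass over the first eight characters (acc = acc*2 + int(ch)) followed by one final doubling.
import Mathlib
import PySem

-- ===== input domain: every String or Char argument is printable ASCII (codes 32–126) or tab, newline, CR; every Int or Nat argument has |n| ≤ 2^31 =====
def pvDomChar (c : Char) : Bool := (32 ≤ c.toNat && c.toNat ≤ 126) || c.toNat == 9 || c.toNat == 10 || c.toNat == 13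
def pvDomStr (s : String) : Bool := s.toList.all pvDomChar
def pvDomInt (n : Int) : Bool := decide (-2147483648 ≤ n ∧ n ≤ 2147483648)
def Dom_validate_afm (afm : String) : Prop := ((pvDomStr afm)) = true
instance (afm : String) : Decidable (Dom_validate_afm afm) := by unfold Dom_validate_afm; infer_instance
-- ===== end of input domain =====

-- B replaces A's backward loop with an explicit power variable by a forward Horner pass
-- over the first eight characters (objective: simpler); same return value everywhere.

-- int(<one-character digit string>); the 0-defaults are exact here: both programs only apply
-- int() after the isdigit/length guard, so the character exists and int() cannot raise.
def digitInt (c : Char) : Int := (PySem.Int.ofChars? [c]).getD 0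
def intAt (afm : String) (i : Int) : Int := (PySem.Str.pyGet? afm i).elim 0 digitInt

-- ===== PORT A =====
def validate_afm (afm : String) : Bool :=
  if !PySem.Str.strIsdigit afm || PySem.Str.len afm ≠ 9 || afm = "000000000" then false
  else
    -- m = 1; s = 0; for i in range(7, -1, -1): m *= 2; s += int(afm[i]) * m
    let ms := (PySem.List.pyRange 7 (-1) (-1)).foldl
      (fun (p : Int × Int) i => (p.1 * 2, p.2 + intAt afm i * (p.1 * 2))) (1, 0)
    decide (PySem.Int.mod (PySem.Int.mod ms.2 11) 10 = intAt afm 8)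

-- ===== PORT B =====
def validate_afm_alt (afm : String) : Bool :=
  if !PySem.Str.strIsdigit afm || PySem.Str.len afm ≠ 9 || afm = "000000000" then false
  else
    -- acc = 0; for ch in afm[:8]: acc = acc * 2 + int(ch)
    let acc := (PySem.Str.slice afm none (some 8)).toList.foldl
      (fun a c => a * 2 + digitInt c) 0
    decide (PySem.Int.mod (PySem.Int.mod (acc * 2) 11) 10 = intAt afm 8)

-- ===== PRECONDITION & SPEC =====
def Spec_validate_afm (afm : String) (out : Bool) : Prop := out = validate_afm_alt afm
instance (afm : String) (out : Bool) : Decidable (Spec_validate_afm afm out) := by unfold Spec_validate_afm; infer_instance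

-- ===== CLAIM (what is proved, stated in full; the proofs are below) =====
def Claim_equal_validate_afm : Prop := ∀ (afm : String), Dom_validate_afm afm → Spec_validate_afm afm (validate_afm afm)

-- ===== LEMMAS AND PROOFS =====

-- On a 9-character string the two weighted sums agree: A's Σ d[i]·2^(8-i) equals B's Horner acc·2.
theorem sums_eq (afm : String) (h : afm.toList.length = 9) :
    ((PySem.List.pyRange 7 (-1) (-1)).foldl
      (fun (p : Int × Int) i => (p.1 * 2, p.2 + intAt afm i * (p.1 * 2))) (1, 0)).2
    = ((PySem.Str.slice afm none (some 8)).toList.foldl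
        (fun a c => a * 2 + digitInt c) 0) * 2 := by
  obtain ⟨c0, c1, c2, c3, c4, c5, c6, c7, c8, hl⟩ :
      ∃ c0 c1 c2 c3 c4 c5 c6 c7 c8,
        afm.toList = [c0, c1, c2, c3, c4, c5, c6, c7, c8] := by
    have h' := h
    rcases hcs : afm.toList with _ | ⟨c0, l⟩
    · rw [hcs] at h'; simp at h'
    rcases l with _ | ⟨c1, l⟩
    · rw [hcs] at h'; simp at h'
    rcases l with _ | ⟨c2, l⟩
    · rw [hcs] at h'; simp at h'
    rcases l with _ | ⟨c3, l⟩
    · rw [hcs] at h'; simp at h'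
    rcases l with _ | ⟨c4, l⟩
    · rw [hcs] at h'; simp at h'
    rcases l with _ | ⟨c5, l⟩
    · rw [hcs] at h'; simp at h'
    rcases l with _ | ⟨c6, l⟩
    · rw [hcs] at h'; simp at h'
    rcases l with _ | ⟨c7, l⟩
    · rw [hcs] at h'; simp at h'
    rcases l with _ | ⟨c8, l⟩
    · rw [hcs] at h'; simp at h'
    rcases l with _ | ⟨c9, l⟩
    · exact ⟨c0, c1, c2, c3, c4, c5, c6, c7, c8, rfl⟩
    · rw [hcs] at h'; simp at h'
  have hrange : PySem.List.pyRange 7 (-1) (-1) = [7, 6, 5, 4, 3, 2, 1, 0] := by decide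
  simp only [hrange, intAt, PySem.Str.pyGet?_eq, PySem.Chars.pyGet?_eq_listPyGet?, hl,
    PySem.Str.toList_slice, PySem.Chars.slice_eq_listSlice, List.foldl]
  norm_num [PySem.List.pyGet?, PySem.List.pyIdx?, PySem.List.slice, PySem.List.clampIdx]
  simp only [Int.toNat, List.take_succ_cons, List.take_zero, List.foldl_cons, List.foldl_nil,
    List.getElem_cons_succ, List.getElem_cons_zero]
  ring

-- ===== VERDICT (by name: the statement is the Claim_ definition above) =====
theorem validate_afm_spec : Claim_equal_validate_afm := by
  intro afm _
  unfold Spec_validate_afm validate_afm validate_afm_alt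
  by_cases hg : (!PySem.Str.strIsdigit afm || PySem.Str.len afm ≠ 9 || afm = "000000000") = true
  · simp only [hg, if_true]
  · simp only [Bool.not_eq_true] at hg
    have hlen : afm.toList.length = 9 := by
      have hg' := hg
      simp only [Bool.or_eq_false_iff, Bool.not_eq_false', decide_eq_false_iff_not,
        Decidable.not_not, PySem.Str.len_eq] at hg'
      have h9 : (afm.toList.length : Int) = 9 := by
        rw [String.length_toList]; exact hg'.1.2
      exact_mod_cast h9
    simp only [hg, Bool.false_eq_true, if_false]
    rw [sums_eq afm hlen]
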